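-- pv_equiv track=rewrite | github.com/Arsen1302/Code-copy-detector | TestData/solutions/problem_648_5_1.py | solution_648_5_1
-- ===== SOURCE A (Python) =====
-- from typing import List
--
-- def solution_648_5_1(n: int, k: int) -> List[int]:
--     def solution_648_5_2(d, num, i):
--         num = num * 10 + d
--
--         if i == n:
--             result.append(num)
--             return
--
--         if d + k < 10:
--             solution_648_5_2(d + k, num, i + 1)
--
--         if k > 0 and d - k >= 0:
--             solution_648_5_2(d - k, num, i + 1)
--
--     result = []
--     for d in range(1, 10):
--         solution_648_5_2(d, 0, 1)
--
--     return result
-- ===== SOURCE B (Python) =====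
-- def solution_648_5_1(n, k):
--     result = []
--     stack = [(d, 0, 1) for d in range(9, 0, -1)]
--     while stack:
--         d, num, i = stack.pop()
--         num = num * 10 + d
--         if i == n:
--             result.append(num)
--         else:
--             if k > 0 and d - k >= 0:
--                 stack.append((d - k, num, i + 1))
--             if d + k < 10:
--                 stack.append((d + k, num, i + 1))
--     return result
-- ===== Notes on version B (the rewrite author's own statement) =====
-- stated objective: alternative
-- what changed: Replaced the recursive nested helper (closure appending to an outer list) with an explicit iterative stack-based DFS that pushes the d-k branch before the d+k branch to reproduce A's exact output order.
import Mathlib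
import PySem

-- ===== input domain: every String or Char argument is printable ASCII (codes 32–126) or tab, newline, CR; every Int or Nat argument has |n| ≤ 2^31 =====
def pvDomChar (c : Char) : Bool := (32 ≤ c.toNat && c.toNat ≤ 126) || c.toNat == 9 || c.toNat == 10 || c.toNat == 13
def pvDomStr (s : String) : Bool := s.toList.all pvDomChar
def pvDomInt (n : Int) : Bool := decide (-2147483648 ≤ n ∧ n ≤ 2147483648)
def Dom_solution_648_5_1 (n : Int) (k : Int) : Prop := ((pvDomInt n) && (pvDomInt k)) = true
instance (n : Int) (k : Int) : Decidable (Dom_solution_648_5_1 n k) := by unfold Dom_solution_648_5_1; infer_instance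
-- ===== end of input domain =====

-- B replaces A's recursive helper by an explicit stack-driven DFS (same output, same order); objective: alternative.

-- ===== PORT A =====
-- A's inner recursion terminates because i increases to n; ported with fuel = remaining
-- depth (n - i).toNat, which is exact on Pre_ (fuel 0 is only reached when no branch fires).
def pvRecA (n k : Int) : Nat → Int → Int → Int → List Int → List Int
  | fuel, d, num, i, acc =>
    let num' := num * 10 + d
    if i = n then acc ++ [num']
    else
      match fuel with
      | 0 => acc
      | f + 1 =>
        let acc1 := if d + k < 10 then pvRecA n k f (d + k) num' (i + 1) acc else acc
        if 0 < k ∧ 0 ≤ d - k then pvRecA n k f (d - k) num' (i + 1) acc1 else acc1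

def solution_648_5_1 (n : Int) (k : Int) : List Int :=
  (PySem.List.pyRange 1 10 1).foldl (fun acc d => pvRecA n k (n - 1).toNat d 0 1 acc) []

-- ===== PORT B =====
-- The Python stack (append/pop at the end) is represented top-at-head: Python's
-- stack.pop() is taking the head, stack.append is cons; the seed list
-- [(d,0,1) for d in range(9,0,-1)] therefore appears reversed.
-- The while loop is made total with fuel 9 * 2^((n-1).toNat + 1), an upper bound
-- on the number of pops (proved below); inside Pre_ the fuel is never exhausted.
def pvLoopB (n k : Int) : Nat → List (Int × Int × Int) → List Int → List Int
  | _, [], res => res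
  | 0, _, res => res
  | fuel + 1, (d, num, i) :: rest, res =>
    let num' := num * 10 + d
    if i = n then pvLoopB n k fuel rest (res ++ [num'])
    else
      let stack1 := if 0 < k ∧ 0 ≤ d - k then (d - k, num', i + 1) :: rest else rest
      let stack2 := if d + k < 10 then (d + k, num', i + 1) :: stack1 else stack1
      pvLoopB n k fuel stack2 res

def solution_648_5_1_alt (n : Int) (k : Int) : List Int :=
  pvLoopB n k (9 * 2 ^ ((n - 1).toNat + 1))
    (((PySem.List.pyRange 9 0 (-1)).map (fun d => (d, (0 : Int), (1 : Int)))).reverse) []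

-- ===== PRECONDITION & SPEC =====
-- Pre_ excludes exactly the inputs where A recurses without bound (RecursionError):
-- n ≤ 0 together with k < 10 (for n ≤ 0 with k ≥ 10 no branch ever fires and A returns []).
def Pre_solution_648_5_1 (n : Int) (k : Int) : Prop := 1 ≤ n ∨ 10 ≤ k
instance (n : Int) (k : Int) : Decidable (Pre_solution_648_5_1 n k) := by
  unfold Pre_solution_648_5_1; infer_instance

def pvWitness_solution_648_5_1 : Int × Int := (3, 2)

def Spec_solution_648_5_1 (n : Int) (k : Int) (out : List Int) : Prop := out = solution_648_5_1_alt n k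
instance (n : Int) (k : Int) (out : List Int) : Decidable (Spec_solution_648_5_1 n k out) := by unfold Spec_solution_648_5_1; infer_instance

-- ===== CLAIM (what is proved, stated in full; the proofs are below) =====
def Claim_equal_solution_648_5_1 : Prop := ∀ (n : Int) (k : Int), Dom_solution_648_5_1 n k → Pre_solution_648_5_1 n k → Spec_solution_648_5_1 n k (solution_648_5_1 n k)

-- ===== LEMMAS AND PROOFS =====

-- size of the DFS tree rooted at (d, i) with remaining fuel
def pvSize (n k : Int) : Nat → Int → Int → Nat
  | fuel, d, i =>
    if i = n then 1
    else
      match fuel with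
      | 0 => 1
      | f + 1 =>
        1 + (if d + k < 10 then pvSize n k f (d + k) (i + 1) else 0)
          + (if 0 < k ∧ 0 ≤ d - k then pvSize n k f (d - k) (i + 1) else 0)

lemma pvSize_pos (n k : Int) (fuel : Nat) (d i : Int) : 1 ≤ pvSize n k fuel d i := by
  cases fuel <;> · rw [pvSize]; split_ifs <;> omega

lemma pvSize_lt (n k : Int) : ∀ (fuel : Nat) (d i : Int), pvSize n k fuel d i < 2 ^ (fuel + 1)
  | 0, d, i => by rw [pvSize]; split_ifs <;> simp
  | f + 1, d, i => by
    rw [pvSize]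
    have h1 := pvSize_lt n k f (d + k) (i + 1)
    have h2 := pvSize_lt n k f (d - k) (i + 1)
    have : (2 : Nat) ^ (f + 1 + 1) = 2 ^ (f + 1) + 2 ^ (f + 1) := by ring
    split_ifs <;> omega

def pvCost (n k : Int) : List (Int × Int × Int) → Nat
  | [] => 0
  | (d, _, i) :: rest => pvSize n k (n - i).toNat d i + pvCost n k rest

lemma toNat_step {n i : Int} (h : i < n) : (n - i).toNat = (n - (i + 1)).toNat + 1 := by omega

-- the stack loop, given enough fuel and all stack indices ≤ n, computes the fold of the recursion
lemma loop_eq (n k : Int) : ∀ (F : Nat) (stack : List (Int × Int × Int)) (res : List Int),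
    (∀ e ∈ stack, e.2.2 ≤ n) → pvCost n k stack ≤ F →
    pvLoopB n k F stack res
      = stack.foldl (fun r e => pvRecA n k (n - e.2.2).toNat e.1 e.2.1 e.2.2 r) res := by
  intro F
  induction F with
  | zero =>
    intro stack res hinv hc
    cases stack with
    | nil => simp [pvLoopB]
    | cons e rest =>
      exfalso
      obtain ⟨d, num, i⟩ := e
      have := pvSize_pos n k (n - i).toNat d i
      simp [pvCost] at hc; omega
  | succ f ih =>
    intro stack res hinv hc
    cases stack with
    | nil => simp [pvLoopB]
    | cons e rest =>
      obtain ⟨d, num, i⟩ := e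
      have hi : i ≤ n := hinv (d, num, i) (by simp)
      have hrest : ∀ e ∈ rest, e.2.2 ≤ n := fun e he => hinv e (List.mem_cons_of_mem _ he)
      have hcost : pvCost n k ((d, num, i) :: rest)
          = pvSize n k (n - i).toNat d i + pvCost n k rest := rfl
      by_cases hin : i = n
      · -- append case
        rw [pvLoopB, if_pos hin]
        have hs : pvSize n k (n - i).toNat d i = 1 := by
          rw [pvSize.eq_def]; simp [hin]
        rw [ih rest (res ++ [num * 10 + d]) hrest (by omega)]
        simp only [List.foldl_cons]
        congr 1
        rw [pvRecA.eq_def]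
        simp [hin]
      · have hlt : i < n := lt_of_le_of_ne hi hin
        have hstep : (n - i).toNat = (n - (i + 1)).toNat + 1 := toNat_step hlt
        have hsize : pvSize n k (n - i).toNat d i
            = 1 + (if d + k < 10 then pvSize n k ((n - (i + 1)).toNat) (d + k) (i + 1) else 0)
              + (if 0 < k ∧ 0 ≤ d - k then pvSize n k ((n - (i + 1)).toNat) (d - k) (i + 1) else 0) := by
          rw [hstep, pvSize, if_neg hin]
        have hrec : pvRecA n k (n - i).toNat d num i res
            = (if 0 < k ∧ 0 ≤ d - k then pvRecA n k ((n - (i + 1)).toNat) (d - k) (num * 10 + d) (i + 1)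
                  (if d + k < 10 then pvRecA n k ((n - (i + 1)).toNat) (d + k) (num * 10 + d) (i + 1) res else res)
               else (if d + k < 10 then pvRecA n k ((n - (i + 1)).toNat) (d + k) (num * 10 + d) (i + 1) res else res)) := by
          rw [hstep, pvRecA.eq_def]
          simp only [if_neg hin]
        rw [hcost, hsize] at hc
        rw [pvLoopB]
        simp only [if_neg hin]
        by_cases h2 : d + k < 10 <;> by_cases h1 : 0 < k ∧ 0 ≤ d - k
        · simp only [if_pos h2, if_pos h1] at hc ⊢
          rw [ih ((d + k, num * 10 + d, i + 1) :: (d - k, num * 10 + d, i + 1) :: rest) res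
              ((List.forall_mem_cons).2 ⟨by simpa using hlt,
                (List.forall_mem_cons).2 ⟨by simpa using hlt, hrest⟩⟩)
              (by simp only [pvCost]; omega)]
          simp only [List.foldl_cons]
          congr 1
          rw [hrec, if_pos h1, if_pos h2]
        · simp only [if_pos h2, if_neg h1] at hc ⊢
          rw [ih ((d + k, num * 10 + d, i + 1) :: rest) res
              ((List.forall_mem_cons).2 ⟨by simpa using hlt, hrest⟩)
              (by simp only [pvCost]; omega)]
          simp only [List.foldl_cons]
          congr 1
          rw [hrec, if_neg h1, if_pos h2]
        · simp only [if_neg h2, if_pos h1] at hc ⊢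
          rw [ih ((d - k, num * 10 + d, i + 1) :: rest) res
              ((List.forall_mem_cons).2 ⟨by simpa using hlt, hrest⟩)
              (by simp only [pvCost]; omega)]
          simp only [List.foldl_cons]
          congr 1
          rw [hrec, if_pos h1, if_neg h2]
        · simp only [if_neg h2, if_neg h1] at hc ⊢
          rw [ih rest res hrest (by omega)]
          simp only [List.foldl_cons]
          congr 1
          rw [hrec, if_neg h1, if_neg h2]

-- with n ≤ 0 and 10 ≤ k the loop pops every seed and never pushes
lemma loopB_stuck (n k : Int) (hn : n ≤ 0) (hk : 10 ≤ k) :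
    ∀ (F : Nat) (stack : List (Int × Int × Int)) (res : List Int),
    (∀ e ∈ stack, e.2.2 = 1 ∧ 1 ≤ e.1 ∧ e.1 ≤ 9) → pvLoopB n k F stack res = res := by
  intro F
  induction F with
  | zero => intro stack res _; cases stack <;> simp [pvLoopB]
  | succ f ih =>
    intro stack res hinv
    cases stack with
    | nil => simp [pvLoopB]
    | cons e rest =>
      obtain ⟨d, num, i⟩ := e
      obtain ⟨hi, hd1, hd9⟩ := hinv (d, num, i) (by simp)
      simp only at hi hd1 hd9
      have h1 : ¬(i = n) := by omega
      have h2 : ¬(0 < k ∧ 0 ≤ d - k) := by omega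
      have h3 : ¬(d + k < 10) := by omega
      rw [pvLoopB]
      simp only [if_neg h1, if_neg h2, if_neg h3]
      exact ih rest res (fun e he => hinv e (List.mem_cons_of_mem _ he))

lemma recA_fuel0 (n k d num : Int) (acc : List Int) (hn : (1 : Int) ≠ n) :
    pvRecA n k 0 d num 1 acc = acc := by
  rw [pvRecA, if_neg hn]

-- ===== VERDICT (by name: the statement is the Claim_ definition above) =====
theorem solution_648_5_1_spec : Claim_equal_solution_648_5_1 := by
  intro n k _ hpre
  unfold Spec_solution_648_5_1 solution_648_5_1 solution_648_5_1_alt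
  by_cases hn : 1 ≤ n
  · have hseed : (((PySem.List.pyRange 9 0 (-1)).map (fun d => (d, (0 : Int), (1 : Int)))).reverse)
        = [(1, 0, 1), (2, 0, 1), (3, 0, 1), (4, 0, 1), (5, 0, 1), (6, 0, 1), (7, 0, 1), (8, 0, 1), (9, 0, 1)] := by decide
    have hrange : PySem.List.pyRange 1 10 1 = [1, 2, 3, 4, 5, 6, 7, 8, 9] := by decide
    rw [hseed, hrange]
    have hb := pvSize_lt n k (n - 1).toNat
    rw [loop_eq n k _ _ []
      (by intro e he; fin_cases he <;> simpa using hn)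
      (by
        simp only [pvCost]
        have h1 := hb 1 1; have h2 := hb 2 1; have h3 := hb 3 1
        have h4 := hb 4 1; have h5 := hb 5 1; have h6 := hb 6 1
        have h7 := hb 7 1; have h8 := hb 8 1; have h9 := hb 9 1
        omega)]
    simp [List.foldl_cons]
  · -- n ≤ 0 and (from Pre_) 10 ≤ k: both sides are []
    have hk : 10 ≤ k := hpre.resolve_left hn
    have hrange : PySem.List.pyRange 1 10 1 = [1, 2, 3, 4, 5, 6, 7, 8, 9] := by decide
    have hfuel : (n - 1).toNat = 0 := by omega
    rw [hrange, hfuel]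
    rw [loopB_stuck n k (by omega) hk _ _ []
      (by intro e he; fin_cases he <;> refine ⟨rfl, by norm_num, by norm_num⟩)]
    simp [List.foldl_cons, recA_fuel0 n k _ _ _ (by omega : (1:Int) ≠ n)]
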